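-- pv_equiv track=rewrite | github.com/sortitionfoundation/sortition-algorithms | benchmarks/anonymize_data.py | create_address_mappings
-- ===== SOURCE A (Python) =====
-- def create_address_mappings(
--     people_rows: list[dict[str, str]],
--     address_columns: list[str],
-- ) -> tuple[dict[str, str], dict[str, dict[str, str]]]:
--     """Create mappings for anonymizing address columns.
--
--     Preserves duplicate detection by mapping identical addresses to identical values.
--
--     Returns:
--         tuple of (address_col_map, address_value_maps)
--         - address_col_map: old_col -> new_col (e.g., "primary_address1" -> "address1")
--         - address_value_maps: col_name -> {old_value -> new_value}
--     """
--     address_col_map: dict[str, str] = {}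
--     address_value_maps: dict[str, dict[str, str]] = {}
--
--     for idx, col_name in enumerate(address_columns, start=1):
--         new_col_name = f"address{idx}"
--         address_col_map[col_name] = new_col_name
--
--         # Collect unique values for this column
--         unique_values: dict[str, str] = {}
--         value_counter = 1
--
--         for row in people_rows:
--             old_value = row.get(col_name, "")
--             if old_value not in unique_values:
--                 unique_values[old_value] = f"a{idx}value{value_counter}"
--                 value_counter += 1
--
--         address_value_maps[col_name] = unique_values
--
--     return address_col_map, address_value_maps
-- ===== SOURCE B (Python) =====
-- def create_address_mappings(people_rows, address_columns):
--     # Loop interchange: instead of re-scanning all rows once per column, make ONE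
--     # pass over the rows and anonymize every column simultaneously, keeping
--     # per-column state (value map and next counter) in dicts keyed by column.
--     address_col_map = {}
--     prefixes = {}
--     address_value_maps = {}
--     counters = {}
--     for idx, col_name in enumerate(address_columns, start=1):
--         address_col_map[col_name] = f"address{idx}"
--         prefixes[col_name] = f"a{idx}value"
--         address_value_maps[col_name] = {}
--         counters[col_name] = 1
--     for row in people_rows:
--         for col_name in address_columns:
--             old_value = row.get(col_name, "")
--             value_map = address_value_maps[col_name]
--             if old_value not in value_map:
--                 value_map[old_value] = prefixes[col_name] + str(counters[col_name])
--                 counters[col_name] += 1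
--     return address_col_map, address_value_maps
-- ===== Notes on version B (the rewrite author's own statement) =====
-- stated objective: alternative
-- what changed: Loop interchange: instead of A's per-column rescans of all rows with an interleaved dedup-and-number loop, B makes one pass over the rows and anonymizes every column simultaneously, keeping per-column state (value map, prefix, counter) in dicts keyed by column.
import Mathlib
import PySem

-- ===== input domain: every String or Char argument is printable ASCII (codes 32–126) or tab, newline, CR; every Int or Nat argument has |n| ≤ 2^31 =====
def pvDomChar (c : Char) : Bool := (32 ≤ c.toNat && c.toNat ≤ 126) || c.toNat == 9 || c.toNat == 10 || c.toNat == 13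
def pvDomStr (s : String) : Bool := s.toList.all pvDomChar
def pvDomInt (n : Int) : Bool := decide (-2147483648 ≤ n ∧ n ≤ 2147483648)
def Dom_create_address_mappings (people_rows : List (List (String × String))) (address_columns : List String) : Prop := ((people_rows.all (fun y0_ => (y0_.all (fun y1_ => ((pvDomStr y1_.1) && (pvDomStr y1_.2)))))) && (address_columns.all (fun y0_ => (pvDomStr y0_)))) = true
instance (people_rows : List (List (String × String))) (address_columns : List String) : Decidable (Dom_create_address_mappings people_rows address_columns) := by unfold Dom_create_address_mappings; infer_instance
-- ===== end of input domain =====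

-- B interchanges A's loops: one pass over the rows anonymizing all columns
-- simultaneously with per-column state dicts, instead of per-column rescans of
-- the rows. Objective: alternative (same asymptotic cost, different traversal).

-- ===== PORT A =====
-- A: outer loop over columns carrying (col_map, value_maps, idx); per column an
-- interleaved loop over ALL rows maintaining (unique_values, value_counter).
def create_address_mappings (people_rows : List (List (String × String))) (address_columns : List String) : (List (String × String)) × (List (String × List (String × String))) :=
  let st := address_columns.foldl
    (fun (st : PySem.Dict String String × PySem.Dict String (List (String × String)) × Int) col_name =>
      let idx := st.2.2
      let new_col_name := "address" ++ PySem.Int.toStr idx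
      let address_col_map := st.1.insert col_name new_col_name
      let inner := people_rows.foldl
        (fun (acc : PySem.Dict String String × Int) row =>
          let old_value := PySem.Dict.getD (PySem.Dict.mk row) col_name ""
          if acc.1.contains old_value then acc
          else (acc.1.insert old_value ("a" ++ PySem.Int.toStr idx ++ "value" ++ PySem.Int.toStr acc.2), acc.2 + 1))
        (PySem.Dict.empty, 1)
      (address_col_map, st.2.1.insert col_name inner.1.items, idx + 1))
    (PySem.Dict.empty, PySem.Dict.empty, 1)
  (st.1.items, st.2.1.items)

-- ===== PORT B =====
-- B: one init loop over enumerate(cols, 1) building col_map/prefixes/value_maps/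
-- counters, then ONE pass over the rows with an inner loop over the columns.
-- Python's prefixes[col] / counters[col] always hit a key installed by the init
-- loop, so porting them as getD with a never-used default is exact.
def create_address_mappings_alt (people_rows : List (List (String × String))) (address_columns : List String) : (List (String × String)) × (List (String × List (String × String))) :=
  let init := (PySem.List.enumerate address_columns 1).foldl
    (fun (st : PySem.Dict String String × PySem.Dict String String × PySem.Dict String (PySem.Dict String String) × PySem.Dict String Int) p =>
      (st.1.insert p.2 ("address" ++ PySem.Int.toStr p.1),
       st.2.1.insert p.2 ("a" ++ PySem.Int.toStr p.1 ++ "value"),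
       st.2.2.1.insert p.2 PySem.Dict.empty,
       st.2.2.2.insert p.2 1))
    (PySem.Dict.empty, PySem.Dict.empty, PySem.Dict.empty, PySem.Dict.empty)
  let prefixes := init.2.1
  let fin := people_rows.foldl
    (fun (st : PySem.Dict String (PySem.Dict String String) × PySem.Dict String Int) row =>
      address_columns.foldl
        (fun (st2 : PySem.Dict String (PySem.Dict String String) × PySem.Dict String Int) col_name =>
          let old_value := PySem.Dict.getD (PySem.Dict.mk row) col_name ""
          let value_map := st2.1.getD col_name PySem.Dict.empty
          if value_map.contains old_value then st2
          else
            (st2.1.insert col_name (value_map.insert old_value (PySem.Dict.getD prefixes col_name "" ++ PySem.Int.toStr (PySem.Dict.getD st2.2 col_name 0))),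
             st2.2.insert col_name (PySem.Dict.getD st2.2 col_name 0 + 1)))
        st)
    (init.2.2.1, init.2.2.2)
  (init.1.items, fin.1.items.map (fun q => (q.1, q.2.items)))

-- ===== PRECONDITION & SPEC =====
def Spec_create_address_mappings (people_rows : List (List (String × String))) (address_columns : List String) (out : (List (String × String)) × (List (String × List (String × String)))) : Prop := out = create_address_mappings_alt people_rows address_columns
instance (people_rows : List (List (String × String))) (address_columns : List String) (out : (List (String × String)) × (List (String × List (String × String)))) : Decidable (Spec_create_address_mappings people_rows address_columns out) := by unfold Spec_create_address_mappings; infer_instance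

-- ===== CLAIM (what is proved, stated in full; the proofs are below) =====
def Claim_equal_create_address_mappings : Prop := ∀ (people_rows : List (List (String × String))) (address_columns : List String), Dom_create_address_mappings people_rows address_columns → Spec_create_address_mappings people_rows address_columns (create_address_mappings people_rows address_columns)

-- ===== LEMMAS AND PROOFS =====

-- row.get(col, "")
def pvVal (row : List (String × String)) (c : String) : String := PySem.Dict.getD (PySem.Dict.mk row) c ""

-- ordered unique values of a column
def pvU (people_rows : List (List (String × String))) (c : String) : List String :=
  PySem.List.dedup (people_rows.map (fun r => pvVal r c))

-- the common per-column dedup-and-number step, with the name prefix abstracted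
def pvStep (pre : String) (st : PySem.Dict String String × Int) (v : String) : PySem.Dict String String × Int :=
  if st.1.contains v then st else (st.1.insert v (pre ++ PySem.Int.toStr st.2), st.2 + 1)

-- the value map a column ends up with: unique old values numbered from k, index idx
def pvMkmap (idx : Int) (k : Int) : List String → List (String × String)
  | [] => []
  | v :: vs => (v, "a" ++ PySem.Int.toStr idx ++ "value" ++ PySem.Int.toStr k) :: pvMkmap idx (k + 1) vs

theorem pvMkmap_contains (idx : Int) (v : String) : ∀ (acc : List String) (k : Int),
    (PySem.Dict.mk (pvMkmap idx k acc)).contains v = acc.contains v := by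
  intro acc
  induction acc with
  | nil => intro k; simp [pvMkmap, PySem.Dict.contains_mk]
  | cons a as ih =>
    intro k
    have hih := ih (k + 1)
    simp only [PySem.Dict.contains_mk] at hih ⊢
    simp only [pvMkmap, List.any_cons, hih, List.contains_cons]
    rw [BEq.comm]


theorem pvMkmap_append (idx : Int) (v : String) : ∀ (xs : List String) (k : Int),
    pvMkmap idx k (xs ++ [v])
      = pvMkmap idx k xs ++ [(v, "a" ++ PySem.Int.toStr idx ++ "value" ++ PySem.Int.toStr (k + xs.length))] := by
  intro xs
  induction xs with
  | nil => intro k; simp [pvMkmap]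
  | cons a as ih =>
    intro k
    have harg : k + 1 + (as.length : Int) = k + ((as.length : Int) + 1) := by ring
    simp only [List.cons_append, pvMkmap, ih (k + 1), List.length_cons, Nat.cast_add,
      Nat.cast_one, harg]

-- the interleaved dedup-and-number fold, started after an already-seen list acc
theorem pvInnerA (idx : Int) : ∀ (vals : List String) (acc : List String),
    vals.foldl (pvStep ("a" ++ PySem.Int.toStr idx ++ "value"))
      (PySem.Dict.mk (pvMkmap idx 1 acc), (acc.length : Int) + 1)
    = (PySem.Dict.mk (pvMkmap idx 1 (PySem.Set.update acc vals)),
       ((PySem.Set.update acc vals).length : Int) + 1) := by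
  intro vals
  induction vals with
  | nil => intro acc; simp [PySem.Set.update]
  | cons v vs ih =>
    intro acc
    simp only [List.foldl_cons, pvStep]
    rw [pvMkmap_contains]
    cases hb : acc.contains v with
    | true =>
      have hm : v ∈ acc := by simpa using hb
      have hadd : PySem.Set.add acc v = acc := by
        simp [PySem.Set.add, PySem.Set.contains, hm]
      have hupd : PySem.Set.update acc (v :: vs) = PySem.Set.update acc vs := by
        simp [PySem.Set.update, hadd]
      rw [hupd]
      exact ih acc
    | false =>
      simp only [Bool.false_eq_true, if_false]
      have hc : (PySem.Dict.mk (pvMkmap idx 1 acc)).contains v = false := by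
        rw [pvMkmap_contains]; exact hb
      have harg : (1 : Int) + (acc.length : Int) = (acc.length : Int) + 1 := by ring
      have hins : (PySem.Dict.mk (pvMkmap idx 1 acc)).insert v
            ("a" ++ PySem.Int.toStr idx ++ "value" ++ PySem.Int.toStr ((acc.length : Int) + 1))
          = PySem.Dict.mk (pvMkmap idx 1 (acc ++ [v])) := by
        apply PySem.Dict.ext
        rw [PySem.Dict.items_insert_of_not_contains _ _ hc, pvMkmap_append, harg]
      rw [hins]
      have hupd : PySem.Set.update acc (v :: vs) = PySem.Set.update (acc ++ [v]) vs := by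
        have hm : v ∉ acc := by simpa using hb
        have hadd : PySem.Set.add acc v = acc ++ [v] := by
          simp [PySem.Set.add, PySem.Set.contains, hm]
        simp [PySem.Set.update, hadd]
      rw [hupd]
      have hlen : ((acc.length : Int) + 1) + 1 = (((acc ++ [v]).length : Int)) + 1 := by
        simp [List.length_append]
      rw [hlen]
      exact ih (acc ++ [v])

-- per-column result of the dedup-and-number fold over all rows
theorem pvInnerFold (people_rows : List (List (String × String))) (idx : Int) (c : String) :
    people_rows.foldl (fun acc row => pvStep ("a" ++ PySem.Int.toStr idx ++ "value") acc (pvVal row c))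
      (PySem.Dict.empty, 1)
    = (PySem.Dict.mk (pvMkmap idx 1 (pvU people_rows c)), ((pvU people_rows c).length : Int) + 1) := by
  have hA := pvInnerA idx (people_rows.map (fun row => pvVal row c)) []
  rw [List.foldl_map] at hA
  have h0 : (PySem.Dict.mk (pvMkmap idx 1 ([] : List String)), ((([] : List String)).length : Int) + 1)
      = ((PySem.Dict.empty : PySem.Dict String String), (1 : Int)) := by
    simp [pvMkmap, PySem.Dict.empty]
  rw [h0] at hA
  exact hA

-- last occurrence (from the right) of key c in a list, by key function k
def pvLast {γ : Type} (l : List γ) (k : γ → String) (c : String) : Option γ :=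
  l.reverse.find? (fun p => k p == c)

-- lookup in a dict built by a fold of inserts = the value of the LAST occurrence
theorem pvGetD_foldl_insert {γ ν : Type} (l : List γ) (k : γ → String) (F : γ → ν)
    (d : PySem.Dict String ν) (c : String) (d0 : ν) :
    (l.foldl (fun d p => d.insert (k p) (F p)) d).getD c d0
      = (match pvLast l k c with
         | some p => F p
         | none => d.getD c d0) := by
  induction l using List.reverseRecOn with
  | nil => simp [pvLast]
  | append_singleton l p ih =>
    rw [List.foldl_append]
    simp only [List.foldl_cons, List.foldl_nil, pvLast, List.reverse_append,
      List.reverse_singleton, List.singleton_append, List.find?_cons] at *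
    cases hb : (k p == c) with
    | true =>
      have : c = k p := (eq_of_beq hb).symm
      simp [this]
    | false =>
      have : c ≠ k p := fun h => by simp [h] at hb
      simp [PySem.Dict.getD_insert, this, ih]

theorem pvLast_enum_mem (cols : List String) (s : Int) (c : String) (h : c ∈ cols) :
    ∃ p : Int × String, pvLast (PySem.List.enumerate cols s) (fun p => p.2) c = some p ∧ p.2 = c := by
  have hex : ∃ x ∈ (PySem.List.enumerate cols s).reverse, ((fun p : Int × String => p.2 == c) x) = true := by
    have : c ∈ (PySem.List.enumerate cols s).map (fun p => p.2) := by
      rw [PySem.List.map_snd_enumerate]; exact h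
    obtain ⟨p, hp, hpc⟩ := List.mem_map.mp this
    exact ⟨p, List.mem_reverse.mpr hp, by simp [hpc]⟩
  have hs : ((PySem.List.enumerate cols s).reverse.find? (fun p => p.2 == c)).isSome := by
    rw [List.find?_isSome]; exact hex
  obtain ⟨p, hp⟩ := Option.isSome_iff_exists.mp hs
  have hpred := List.find?_some hp
  simp only [beq_iff_eq] at hpred
  exact ⟨p, hp, hpred⟩

theorem pvContains_insert {ν : Type} (d : PySem.Dict String ν) (k c : String) (v : ν)
    (h : d.contains c = true) : (d.insert k v).contains c = true := by
  rw [PySem.Dict.contains_insert]; simp [h]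

-- B's inner (per-row, over the columns) step, with the prefix lookup abstracted
def pvIn (prf : String → String) (row : List (String × String))
    (st2 : PySem.Dict String (PySem.Dict String String) × PySem.Dict String Int) (col_name : String) :
    PySem.Dict String (PySem.Dict String String) × PySem.Dict String Int :=
  let old_value := pvVal row col_name
  let value_map := st2.1.getD col_name PySem.Dict.empty
  if value_map.contains old_value then st2
  else
    (st2.1.insert col_name (value_map.insert old_value (prf col_name ++ PySem.Int.toStr (st2.2.getD col_name 0))),
     st2.2.insert col_name (st2.2.getD col_name 0 + 1))

-- the pvStep done twice on the same value is done once
theorem pvStep_idem (pre : String) (st : PySem.Dict String String × Int) (v : String) :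
    pvStep pre (pvStep pre st v) v = pvStep pre st v := by
  by_cases h : st.1.contains v = true
  · simp [pvStep, h]
  · simp only [pvStep, h]
    simp [PySem.Dict.contains_insert_self]


-- ONE row's pass over the columns, seen per column: each column of the list is
-- stepped exactly once (duplicates are no-ops), others untouched; keys unchanged.
theorem pvInnerRow (prf : String → String) (row : List (String × String)) :
    ∀ (cs : List String) (vm : PySem.Dict String (PySem.Dict String String)) (cnt : PySem.Dict String Int),
    (∀ c ∈ cs, vm.contains c = true) → (∀ c ∈ cs, cnt.contains c = true) →
    (∀ c, ((cs.foldl (pvIn prf row) (vm, cnt)).1.getD c PySem.Dict.empty,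
           (cs.foldl (pvIn prf row) (vm, cnt)).2.getD c 0)
        = if c ∈ cs then pvStep (prf c) (vm.getD c PySem.Dict.empty, cnt.getD c 0) (pvVal row c)
          else (vm.getD c PySem.Dict.empty, cnt.getD c 0))
    ∧ (cs.foldl (pvIn prf row) (vm, cnt)).1.keys = vm.keys
    ∧ (cs.foldl (pvIn prf row) (vm, cnt)).2.keys = cnt.keys := by
  intro cs
  induction cs with
  | nil => intro vm cnt _ _; exact ⟨by intro c; simp, rfl, rfl⟩
  | cons c0 cs ih =>
    intro vm cnt hk1 hk2
    simp only [List.foldl_cons]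
    by_cases hc : (vm.getD c0 PySem.Dict.empty).contains (pvVal row c0) = true
    · have hstep : pvIn prf row (vm, cnt) c0 = (vm, cnt) := by
        simp [pvIn, hc]
      rw [hstep]
      obtain ⟨hpt, hkk1, hkk2⟩ := ih vm cnt (fun c h => hk1 c (List.mem_cons_of_mem _ h))
        (fun c h => hk2 c (List.mem_cons_of_mem _ h))
      refine ⟨?_, hkk1, hkk2⟩
      intro c
      rw [hpt c]
      by_cases hec : c = c0
      · rw [hec]
        by_cases hmem : c0 ∈ cs
        · simp [List.mem_cons, hmem]
        · simp only [hmem, if_false, List.mem_cons, true_or, if_true]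
          simp [pvStep, hc]
      · by_cases hmem : c ∈ cs
        · simp [List.mem_cons, hmem]
        · simp [List.mem_cons, hmem, hec]
    · have hstep : pvIn prf row (vm, cnt) c0
          = (vm.insert c0 ((vm.getD c0 PySem.Dict.empty).insert (pvVal row c0)
               (prf c0 ++ PySem.Int.toStr (cnt.getD c0 0))),
             cnt.insert c0 (cnt.getD c0 0 + 1)) := by
        simp [pvIn, hc]
      rw [hstep]
      obtain ⟨hpt, hkk1, hkk2⟩ := ih _ _
        (fun c h => pvContains_insert _ _ _ _ (hk1 c (List.mem_cons_of_mem _ h)))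
        (fun c h => pvContains_insert _ _ _ _ (hk2 c (List.mem_cons_of_mem _ h)))
      have hB : pvStep (prf c0) (vm.getD c0 PySem.Dict.empty, cnt.getD c0 0) (pvVal row c0)
          = ((vm.getD c0 PySem.Dict.empty).insert (pvVal row c0)
               (prf c0 ++ PySem.Int.toStr (cnt.getD c0 0)), cnt.getD c0 0 + 1) := by
        simp [pvStep, hc]
      refine ⟨?_, ?_, ?_⟩
      · intro c
        rw [hpt c]
        rw [PySem.Dict.getD_insert, PySem.Dict.getD_insert]
        by_cases hec : c = c0
        · rw [hec]
          simp only [List.mem_cons, true_or, if_true]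
          by_cases hmem : c0 ∈ cs
          · simp only [hmem, if_true]
            rw [← hB, pvStep_idem]
          · simp only [hmem, if_false]
            exact hB.symm
        · simp [List.mem_cons, hec]
      · rw [hkk1, PySem.Dict.keys_insert_of_contains _ _ (hk1 c0 (List.mem_cons_self))]
      · rw [hkk2, PySem.Dict.keys_insert_of_contains _ _ (hk2 c0 (List.mem_cons_self))]

-- the whole row pass, seen per column: column c gets exactly its own fold
theorem pvRows (prf : String → String) (cols : List String) :
    ∀ (rs : List (List (String × String)))
      (vm : PySem.Dict String (PySem.Dict String String)) (cnt : PySem.Dict String Int),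
    (∀ c ∈ cols, vm.contains c = true) → (∀ c ∈ cols, cnt.contains c = true) →
    (∀ c ∈ cols,
      ((rs.foldl (fun st row => cols.foldl (pvIn prf row) st) (vm, cnt)).1.getD c PySem.Dict.empty,
       (rs.foldl (fun st row => cols.foldl (pvIn prf row) st) (vm, cnt)).2.getD c 0)
        = rs.foldl (fun st row => pvStep (prf c) st (pvVal row c))
            (vm.getD c PySem.Dict.empty, cnt.getD c 0))
    ∧ (rs.foldl (fun st row => cols.foldl (pvIn prf row) st) (vm, cnt)).1.keys = vm.keys
    ∧ (rs.foldl (fun st row => cols.foldl (pvIn prf row) st) (vm, cnt)).2.keys = cnt.keys := by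
  intro rs
  induction rs with
  | nil => intro vm cnt _ _; exact ⟨by intro c _; simp, rfl, rfl⟩
  | cons r rs ih =>
    intro vm cnt hk1 hk2
    simp only [List.foldl_cons]
    obtain ⟨hpt, hkk1, hkk2⟩ := pvInnerRow prf r cols vm cnt hk1 hk2
    set st1 := cols.foldl (pvIn prf r) (vm, cnt) with hst1
    have hk1' : ∀ c ∈ cols, st1.1.contains c = true := by
      intro c h
      rw [PySem.Dict.contains_iff_mem_keys, hkk1, ← PySem.Dict.contains_iff_mem_keys]
      exact hk1 c h
    have hk2' : ∀ c ∈ cols, st1.2.contains c = true := by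
      intro c h
      rw [PySem.Dict.contains_iff_mem_keys, hkk2, ← PySem.Dict.contains_iff_mem_keys]
      exact hk2 c h
    have hmk : st1 = (st1.1, st1.2) := rfl
    obtain ⟨hpt', hkk1', hkk2'⟩ := ih st1.1 st1.2 hk1' hk2'
    rw [hmk]
    refine ⟨?_, by rw [hkk1', hkk1], by rw [hkk2', hkk2]⟩
    intro c hc
    rw [hpt' c hc]
    have := hpt c
    rw [if_pos hc] at this
    rw [this]

-- A's outer loop, with the idx threading detangled into enumerate(cols, idx)
theorem pvOuterA (people_rows : List (List (String × String))) :
    ∀ (cols : List String) (idx : Int) (cm : PySem.Dict String String)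
      (vm : PySem.Dict String (List (String × String))),
    cols.foldl
      (fun (st : PySem.Dict String String × PySem.Dict String (List (String × String)) × Int) col_name =>
        (st.1.insert col_name ("address" ++ PySem.Int.toStr st.2.2),
         st.2.1.insert col_name
           ((people_rows.foldl
              (fun (acc : PySem.Dict String String × Int) row =>
                if acc.1.contains (PySem.Dict.getD (PySem.Dict.mk row) col_name "") then acc
                else (acc.1.insert (PySem.Dict.getD (PySem.Dict.mk row) col_name "")
                        ("a" ++ PySem.Int.toStr st.2.2 ++ "value" ++ PySem.Int.toStr acc.2), acc.2 + 1))
              (PySem.Dict.empty, 1)).1.items),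
         st.2.2 + 1))
      (cm, vm, idx)
    = ((PySem.List.enumerate cols idx).foldl
         (fun d p => d.insert p.2 ("address" ++ PySem.Int.toStr p.1)) cm,
       (PySem.List.enumerate cols idx).foldl
         (fun (d : PySem.Dict String (List (String × String))) p =>
           d.insert p.2 (pvMkmap p.1 1 (pvU people_rows p.2))) vm,
       idx + cols.length) := by
  intro cols
  induction cols with
  | nil => intro idx cm vm; simp
  | cons c cs ih =>
    intro idx cm vm
    simp only [List.foldl_cons, PySem.List.enumerate_cons, List.length_cons]
    have hin : (people_rows.foldl
        (fun (acc : PySem.Dict String String × Int) row =>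
          if acc.1.contains (PySem.Dict.getD (PySem.Dict.mk row) c "") then acc
          else (acc.1.insert (PySem.Dict.getD (PySem.Dict.mk row) c "")
                  ("a" ++ PySem.Int.toStr idx ++ "value" ++ PySem.Int.toStr acc.2), acc.2 + 1))
        (PySem.Dict.empty, 1)).1.items = pvMkmap idx 1 (pvU people_rows c) :=
      congrArg (fun x => x.1.items) (pvInnerFold people_rows idx c)
    rw [hin, ih (idx + 1)]
    simp only [Prod.mk.injEq, true_and]
    push_cast
    ring

-- B's init loop over enumerate builds four independent dicts
theorem pvInitSplit : ∀ (l : List (Int × String)) (a b : PySem.Dict String String)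
    (c : PySem.Dict String (PySem.Dict String String)) (d : PySem.Dict String Int),
    l.foldl
      (fun (st : PySem.Dict String String × PySem.Dict String String × PySem.Dict String (PySem.Dict String String) × PySem.Dict String Int) p =>
        (st.1.insert p.2 ("address" ++ PySem.Int.toStr p.1),
         st.2.1.insert p.2 ("a" ++ PySem.Int.toStr p.1 ++ "value"),
         st.2.2.1.insert p.2 PySem.Dict.empty,
         st.2.2.2.insert p.2 1))
      (a, b, c, d)
    = (l.foldl (fun d p => d.insert p.2 ("address" ++ PySem.Int.toStr p.1)) a,
       l.foldl (fun d p => d.insert p.2 ("a" ++ PySem.Int.toStr p.1 ++ "value")) b,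
       l.foldl (fun d p => d.insert p.2 PySem.Dict.empty) c,
       l.foldl (fun d p => d.insert p.2 (1 : Int)) d) := by
  intro l
  induction l with
  | nil => intro a b c d; rfl
  | cons p ps ih => intro a b c d; simp only [List.foldl_cons]; exact ih _ _ _ _

-- keys of a fold of inserts keyed by the second components, from empty
theorem pvKeysEnum {ν : Type} (cols : List String) (s : Int) (F : Int × String → ν) :
    ((PySem.List.enumerate cols s).foldl (fun d p => d.insert p.2 (F p))
        (PySem.Dict.empty : PySem.Dict String ν)).keys = PySem.Set.ofList cols := by
  rw [PySem.Dict.keys_foldl_insert_key (PySem.List.enumerate cols s) (fun p => p.2) (fun _ p => F p)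
        PySem.Dict.empty]
  rw [PySem.List.map_snd_enumerate]
  rfl

-- index used for a column's value names: the idx of its LAST occurrence in enumerate(cols, 1)
def pvLix (cols : List String) (c : String) : Int :=
  match pvLast (PySem.List.enumerate cols 1) (fun p => p.2) c with
  | some p => p.1
  | none => 0

-- items of a dict-of-dicts with known keys and known per-key items
theorem pvMapItems (d : PySem.Dict String (PySem.Dict String String)) (cols : List String)
    (G : String → List (String × String))
    (hnd : d.keys = PySem.Set.ofList cols)
    (hpt : ∀ c ∈ cols, (d.getD c PySem.Dict.empty).items = G c) :
    d.items.map (fun q => (q.1, q.2.items)) = (PySem.Set.ofList cols).map (fun c => (c, G c)) := by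
  rw [PySem.Dict.items_eq_map_keys d (by rw [hnd]; exact PySem.Set.nodup_ofList _) PySem.Dict.empty,
    hnd, List.map_map]
  apply List.map_congr_left
  intro c hc
  simp only [Function.comp_apply]
  rw [hpt c ((PySem.Set.mem_ofList _ _).mp hc)]

-- items of a dict of lists with known keys and known per-key values
theorem pvItemsOf (d : PySem.Dict String (List (String × String))) (cols : List String)
    (G : String → List (String × String))
    (hnd : d.keys = PySem.Set.ofList cols)
    (hpt : ∀ c ∈ cols, d.getD c [] = G c) :
    d.items = (PySem.Set.ofList cols).map (fun c => (c, G c)) := by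
  rw [PySem.Dict.items_eq_map_keys d (by rw [hnd]; exact PySem.Set.nodup_ofList _) ([] : List (String × String)), hnd]
  apply List.map_congr_left
  intro c hc
  rw [hpt c ((PySem.Set.mem_ofList _ _).mp hc)]

-- ===== VERDICT helper: closed forms of the two ports =====
theorem pvAchar (people_rows : List (List (String × String))) (address_columns : List String) :
    create_address_mappings people_rows address_columns
    = (((PySem.List.enumerate address_columns 1).foldl
          (fun d p => d.insert p.2 ("address" ++ PySem.Int.toStr p.1)) PySem.Dict.empty).items,
       ((PySem.List.enumerate address_columns 1).foldl
          (fun (d : PySem.Dict String (List (String × String))) p =>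
            d.insert p.2 (pvMkmap p.1 1 (pvU people_rows p.2))) PySem.Dict.empty).items) := by
  unfold create_address_mappings
  rw [pvOuterA people_rows address_columns 1 PySem.Dict.empty PySem.Dict.empty]

theorem pvBchar (people_rows : List (List (String × String))) (address_columns : List String) :
    create_address_mappings_alt people_rows address_columns
    = (((PySem.List.enumerate address_columns 1).foldl
          (fun d p => d.insert p.2 ("address" ++ PySem.Int.toStr p.1)) PySem.Dict.empty).items,
       ((PySem.List.enumerate address_columns 1).foldl
          (fun (d : PySem.Dict String (List (String × String))) p =>
            d.insert p.2 (pvMkmap p.1 1 (pvU people_rows p.2))) PySem.Dict.empty).items) := by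
  simp only [create_address_mappings_alt]
  rw [pvInitSplit]
  simp only [Prod.mk.injEq]
  refine ⟨trivial, ?_⟩
  have hfn : (fun (st : PySem.Dict String (PySem.Dict String String) × PySem.Dict String Int) (row : List (String × String)) =>
        List.foldl
          (fun (st2 : PySem.Dict String (PySem.Dict String String) × PySem.Dict String Int) col_name =>
            if (st2.1.getD col_name PySem.Dict.empty).contains (PySem.Dict.getD (PySem.Dict.mk row) col_name "") = true then st2
            else
              (st2.1.insert col_name
                  ((st2.1.getD col_name PySem.Dict.empty).insert (PySem.Dict.getD (PySem.Dict.mk row) col_name "")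
                    (((PySem.List.enumerate address_columns 1).foldl
                        (fun d p => d.insert p.2 ("a" ++ PySem.Int.toStr p.1 ++ "value")) PySem.Dict.empty).getD col_name ""
                      ++ PySem.Int.toStr (st2.2.getD col_name 0))),
                st2.2.insert col_name (st2.2.getD col_name 0 + 1)))
          st address_columns)
      = (fun st row => List.foldl
          (pvIn (fun col => ((PySem.List.enumerate address_columns 1).foldl
              (fun d p => d.insert p.2 ("a" ++ PySem.Int.toStr p.1 ++ "value")) PySem.Dict.empty).getD col "") row)
          st address_columns) := rfl
  rw [hfn]
  have hkeys0 : ((PySem.List.enumerate address_columns 1).foldl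
      (fun d p => d.insert p.2 PySem.Dict.empty) (PySem.Dict.empty : PySem.Dict String (PySem.Dict String String))).keys
      = PySem.Set.ofList address_columns := pvKeysEnum address_columns 1 (fun _ => PySem.Dict.empty)
  have hkeysc : ((PySem.List.enumerate address_columns 1).foldl
      (fun d p => d.insert p.2 1) (PySem.Dict.empty : PySem.Dict String Int)).keys
      = PySem.Set.ofList address_columns := pvKeysEnum address_columns 1 (fun _ => (1 : Int))
  have hc1 : ∀ c ∈ address_columns, ((PySem.List.enumerate address_columns 1).foldl
      (fun d p => d.insert p.2 PySem.Dict.empty) (PySem.Dict.empty : PySem.Dict String (PySem.Dict String String))).contains c = true := by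
    intro c hc
    rw [PySem.Dict.contains_iff_mem_keys, hkeys0]
    exact (PySem.Set.mem_ofList _ _).mpr hc
  have hc2 : ∀ c ∈ address_columns, ((PySem.List.enumerate address_columns 1).foldl
      (fun d p => d.insert p.2 1) (PySem.Dict.empty : PySem.Dict String Int)).contains c = true := by
    intro c hc
    rw [PySem.Dict.contains_iff_mem_keys, hkeysc]
    exact (PySem.Set.mem_ofList _ _).mpr hc
  obtain ⟨hpt, hk1, hk2⟩ := pvRows (fun col => ((PySem.List.enumerate address_columns 1).foldl
      (fun d p => d.insert p.2 ("a" ++ PySem.Int.toStr p.1 ++ "value")) PySem.Dict.empty).getD col "")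
      address_columns people_rows _ _ hc1 hc2
  refine Eq.trans (pvMapItems _ address_columns
      (fun c => pvMkmap (pvLix address_columns c) 1 (pvU people_rows c)) ?_ ?_)
    (Eq.symm (pvItemsOf _ address_columns
      (fun c => pvMkmap (pvLix address_columns c) 1 (pvU people_rows c)) ?_ ?_))
  · rw [hk1]; exact hkeys0
  · intro c hc
    beta_reduce
    obtain ⟨p, hp, hp2⟩ := pvLast_enum_mem address_columns 1 c hc
    have h0 : ((PySem.List.enumerate address_columns 1).foldl
        (fun d p => d.insert p.2 PySem.Dict.empty) (PySem.Dict.empty : PySem.Dict String (PySem.Dict String String))).getD c PySem.Dict.empty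
        = PySem.Dict.empty := by
      have h := pvGetD_foldl_insert (PySem.List.enumerate address_columns 1) (fun p => p.2)
        (fun _ => (PySem.Dict.empty : PySem.Dict String String)) PySem.Dict.empty c PySem.Dict.empty
      rw [hp] at h
      exact h
    have h1 : ((PySem.List.enumerate address_columns 1).foldl
        (fun d p => d.insert p.2 1) (PySem.Dict.empty : PySem.Dict String Int)).getD c 0 = 1 := by
      have h := pvGetD_foldl_insert (PySem.List.enumerate address_columns 1) (fun p => p.2)
        (fun _ => (1 : Int)) PySem.Dict.empty c 0
      rw [hp] at h
      exact h
    have hpre : ((PySem.List.enumerate address_columns 1).foldl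
        (fun d p => d.insert p.2 ("a" ++ PySem.Int.toStr p.1 ++ "value")) PySem.Dict.empty).getD c ""
        = "a" ++ PySem.Int.toStr p.1 ++ "value" := by
      have h := pvGetD_foldl_insert (PySem.List.enumerate address_columns 1) (fun p => p.2)
        (fun p => "a" ++ PySem.Int.toStr p.1 ++ "value") PySem.Dict.empty c ""
      rw [hp] at h
      exact h
    have hcol := hpt c hc
    rw [h0, h1, hpre, pvInnerFold people_rows p.1 c] at hcol
    have hfst := congrArg Prod.fst hcol
    simp only at hfst
    rw [hfst]
    have hl : pvLix address_columns c = p.1 := by unfold pvLix; rw [hp]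
    rw [hl]
  · exact pvKeysEnum address_columns 1 (fun p => pvMkmap p.1 1 (pvU people_rows p.2))
  · intro c hc
    beta_reduce
    obtain ⟨p, hp, hp2⟩ := pvLast_enum_mem address_columns 1 c hc
    have h := pvGetD_foldl_insert (PySem.List.enumerate address_columns 1) (fun p => p.2)
      (fun p => pvMkmap p.1 1 (pvU people_rows p.2)) PySem.Dict.empty c []
    rw [hp] at h
    have hl : pvLix address_columns c = p.1 := by unfold pvLix; rw [hp]
    rw [hl]
    have h' : ((PySem.List.enumerate address_columns 1).foldl
        (fun d p => d.insert p.2 (pvMkmap p.1 1 (pvU people_rows p.2)))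
        (PySem.Dict.empty : PySem.Dict String (List (String × String)))).getD c []
        = pvMkmap p.1 1 (pvU people_rows p.2) := h
    rw [hp2] at h'
    exact h'

-- ===== VERDICT (by name: the statement is the Claim_ definition above) =====
theorem create_address_mappings_spec : Claim_equal_create_address_mappings := by
  intro people_rows address_columns _
  unfold Spec_create_address_mappings
  rw [pvAchar, pvBchar]
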